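-- pv_equiv track=rewrite | github.com/HwiNyeonKim/algorithm-2025 | 연습문제/리코쳇_로봇.py | solution
-- ===== SOURCE A (Python) =====
-- from collections import deque
--
-- DIRS = [
--     [-1, 0],
--     [1, 0],
--     [0, -1],
--     [0, 1],
-- ]
--
-- def move(grid, from_, dir_):
--     # 가장자리 또는 벽에 다다를 때 까지 이동
--     i, j = from_
--     di, dj = dir_
--
--     while (
--         0 <= i + di < len(grid)
--         and 0 <= j + dj < len(grid[i + di])
--         and grid[i + di][j + dj] != "D"
--     ):
--         i += di
--         j += dj
--
--     return i, j
--
-- def solution(board):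
--     # Setup
--     grid = [list(row) for row in board]
--     for i, row in enumerate(grid):
--         for j, value in enumerate(row):
--             if value == "R":
--                 start = (i, j)
--             elif value == "G":
--                 goal = (i, j)
--
--     # Solve
--     queue = deque([(start, 0)])
--     visited = set([start])
--     while queue:
--         (from_), steps = queue.popleft()
--
--         for dir_ in DIRS:
--             to = move(grid, from_, dir_)
--
--             if to in visited:
--                 continue
--
--             if to == goal:
--                 return steps + 1
--
--             visited.add(to)
--             queue.append((to, steps + 1))
--
--     return -1
-- ===== SOURCE B (Python) =====
-- DIRS = [(-1, 0), (1, 0), (0, -1), (0, 1)]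
--
-- def _slide(board, i, j, di, dj):
--     # slide until the edge or a wall 'D'
--     while True:
--         ni, nj = i + di, j + dj
--         if not (0 <= ni < len(board) and 0 <= nj < len(board[ni])) or board[ni][nj] == "D":
--             return (i, j)
--         i, j = ni, nj
--
-- def solution(board):
--     rs = [(i, j) for i, row in enumerate(board) for j, ch in enumerate(row) if ch == "R"]
--     gs = [(i, j) for i, row in enumerate(board) for j, ch in enumerate(row) if ch == "G"]
--     start, goal = rs[-1], gs[-1]
--
--     # k-step reachability by repeated image: reach = set of cells reachable in
--     # exactly k slides; the first k whose set contains the goal is the answer.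
--     # A shortest slide walk never repeats a cell, so its length is < n (cell count).
--     n = sum(len(row) for row in board)
--     reach = {start}
--     for k in range(1, n + 1):
--         reach = {_slide(board, i, j, di, dj) for (i, j) in reach for (di, dj) in DIRS}
--         if goal in reach:
--             return k
--     return -1
-- ===== Notes on version B (the rewrite author's own statement) =====
-- stated objective: alternative
-- what changed: Replaces A's queue-and-visited-set BFS by a search-free fixpoint iteration: B repeatedly applies the one-step slide image to compute the set of cells reachable in exactly k moves (no queue, no visited set, cells may be re-derived) and returns the first k <= cell-count whose set contains the goal, correct because a shortest slide walk never repeats a cell; R/G are found by comprehensions and the board strings are indexed directly instead of building a list-of-lists grid.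
-- outside the precondition, e.g. on solution(['R']): A returns -1, B raises IndexError
import Mathlib
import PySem

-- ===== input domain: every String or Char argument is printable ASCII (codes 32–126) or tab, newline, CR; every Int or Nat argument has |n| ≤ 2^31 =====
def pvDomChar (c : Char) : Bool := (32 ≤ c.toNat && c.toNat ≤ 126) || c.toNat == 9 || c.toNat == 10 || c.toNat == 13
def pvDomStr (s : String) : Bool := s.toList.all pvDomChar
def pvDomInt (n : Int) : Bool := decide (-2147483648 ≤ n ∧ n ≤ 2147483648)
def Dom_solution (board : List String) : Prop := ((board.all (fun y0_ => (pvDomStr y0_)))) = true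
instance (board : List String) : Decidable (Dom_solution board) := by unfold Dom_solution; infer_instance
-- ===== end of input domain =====

-- B replaces A's queue-and-visited-set BFS by repeated application of the one-step
-- slide image (the set of cells reachable in exactly k moves, no queue and no visited
-- set), returning the first k ≤ cell-count whose set contains the goal; R/G are found
-- by comprehensions and the board strings are indexed directly (objective: alternative).

-- ===== PORT A =====
-- A's module constant DIRS.
def dirsConstA : List (Int × Int) := [(-1, 0), (1, 0), (0, -1), (0, 1)]

-- A's `move`: slide from (i,j) in direction (di,dj) until edge or wall 'D'.
-- The while-loop is ported with a fuel argument; the callers pass fuel that exceeds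
-- any possible number of slide steps (each step keeps the position inside the grid).
def moveA (grid : List (List Char)) (di dj : Int) : Nat → Int → Int → (Int × Int)
  | 0, i, j => (i, j)
  | f + 1, i, j =>
    if 0 ≤ i + di ∧ i + di < (grid.length : Int) ∧ 0 ≤ j + dj ∧
        j + dj < ((grid.getD (i + di).toNat []).length : Int) ∧
        (grid.getD (i + di).toNat []).getD (j + dj).toNat ' ' ≠ 'D'
    then moveA grid di dj f (i + di) (j + dj)
    else (i, j)

-- A's setup loop: the two `start`/`goal` variables, kept as a pair of Options
-- (Python leaves them unbound when no 'R'/'G' exists — excluded by Pre_solution).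
def scanA (grid : List (List Char)) : Option (Int × Int) × Option (Int × Int) :=
  (PySem.List.enumerate grid).foldl (fun acc p =>
    (PySem.List.enumerate p.2).foldl (fun acc2 q =>
      if q.2 = 'R' then (some (p.1, q.1), acc2.2)
      else if q.2 = 'G' then (acc2.1, some (p.1, q.1))
      else acc2) acc) (none, none)

-- A's inner `for dir_ in DIRS` body: either an early `return steps + 1` (.inl)
-- or the updated (visited, queue) pair (.inr).
def dirsA (grid : List (List Char)) (gl : (Int × Int)) (fm : Nat) (x : (Int × Int)) (s : Int) :
    List (Int × Int) → PySem.Set (Int × Int) → List ((Int × Int) × Int) → Sum Int (PySem.Set (Int × Int) × List ((Int × Int) × Int))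
  | [], V, q => .inr (V, q)
  | d :: ds, V, q =>
    let dst := moveA grid d.1 d.2 fm x.1 x.2
    if PySem.Set.contains V dst then dirsA grid gl fm x s ds V q
    else if dst = gl then .inl (s + 1)
    else dirsA grid gl fm x s ds (PySem.Set.add V dst) (q ++ [(dst, s + 1)])

-- A's `while queue` loop (fuel-guarded; the caller passes more fuel than the
-- number of pops, which is bounded by the number of grid cells plus one).
def bfsA (grid : List (List Char)) (gl : (Int × Int)) (fm : Nat) :
    Nat → List ((Int × Int) × Int) → PySem.Set (Int × Int) → Int
  | _, [], _ => -1
  | 0, _ :: _, _ => -1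
  | f + 1, (x, s) :: q, V =>
    match dirsA grid gl fm x s dirsConstA V q with
    | .inl r => r
    | .inr (V', q') => bfsA grid gl fm f q' V'

def solution (board : List String) : Int :=
  let grid := board.map (fun r => r.toList)
  match scanA grid with
  | (some st, some gl) =>
      bfsA grid gl (grid.length + (grid.map List.length).sum + 2)
        ((grid.map List.length).sum + 2) [(st, 0)] (PySem.Set.ofList [st])
  | _ => -1   -- Python raises NameError here (no 'R' or no 'G'); outside Pre_solution

-- ===== PORT B =====
def dirs4B : List (Int × Int) := [(-1, 0), (1, 0), (0, -1), (0, 1)]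

-- B's `_slide`: while True with a negated bounds test (fuel-guarded as in port A).
def slideB (board : List String) (di dj : Int) : Nat → Int → Int → (Int × Int)
  | 0, i, j => (i, j)
  | f + 1, i, j =>
    let ni := i + di
    let nj := j + dj
    if ¬ (0 ≤ ni ∧ ni < (board.length : Int) ∧ 0 ≤ nj ∧
          nj < PySem.Str.len (board.getD ni.toNat "")) ∨
        PySem.Str.pyGet? (board.getD ni.toNat "") nj = some 'D'
    then (i, j)
    else slideB board di dj f ni nj

-- B's comprehension [(i, j) for i, row in enumerate(board) for j, ch in enumerate(row) if ch == c].
def occB (board : List String) (c : Char) : List (Int × Int) :=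
  (PySem.List.enumerate board).flatMap (fun p =>
    (PySem.List.enumerate p.2.toList).filterMap (fun q =>
      if q.2 = c then some (p.1, q.1) else none))

-- B's `for k in range(1, n + 1)` loop: `reach` is rebuilt each round as the set
-- comprehension {_slide(board, i, j, di, dj) for (i, j) in reach for (di, dj) in DIRS};
-- the countdown `t` is the number of remaining rounds, `k` the Python loop variable.
def loopB (board : List String) (gl : (Int × Int)) (fm : Nat) :
    Nat → Int → PySem.Set (Int × Int) → Int
  | 0, _, _ => -1
  | t + 1, k, reach =>
    let r' := PySem.Set.ofList (reach.flatMap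
      (fun c => dirs4B.map (fun d => slideB board d.1 d.2 fm c.1 c.2)))
    if PySem.Set.contains r' gl then k else loopB board gl fm t (k + 1) r'

def solution_alt (board : List String) : Int :=
  let rs := occB board 'R'
  let gs := occB board 'G'
  match PySem.List.pyGet? rs (-1) with
  | none => -1   -- Python raises IndexError here (no 'R'); outside Pre_solution
  | some st =>
    match PySem.List.pyGet? gs (-1) with
    | none => -1   -- Python raises IndexError here (no 'G'); outside Pre_solution
    | some gl =>
        loopB board gl (board.length + (board.map (fun r => r.toList.length)).sum + 2)
          ((board.map (fun r => r.toList.length)).sum) 1 (PySem.Set.ofList [st])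

-- ===== PRECONDITION & SPEC =====
-- Pre_ excludes boards with no 'R' or no 'G' cell: A raises NameError there (returning -1
-- only when additionally the robot cannot leave its cell), while B raises IndexError on all of them.
def Pre_solution (board : List String) : Prop :=
  (∃ r ∈ board, 'R' ∈ r.toList) ∧ (∃ r ∈ board, 'G' ∈ r.toList)

instance (board : List String) : Decidable (Pre_solution board) := by
  unfold Pre_solution; infer_instance

def pvWitness_solution : List String := ["RG"]

def Spec_solution (board : List String) (out : Int) : Prop := out = solution_alt board
instance (board : List String) (out : Int) : Decidable (Spec_solution board out) := by
  unfold Spec_solution; infer_instance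

-- ===== CLAIM (what is proved, stated in full; the proofs are below) =====
def Claim_equal_solution : Prop :=
  ∀ (board : List String), Dom_solution board → Pre_solution board →
    Spec_solution board (solution board)

-- ===== LEMMAS AND PROOFS =====

def bmap (board : List String) : List (List Char) := board.map (fun r => r.toList)

def Vd (board : List String) (p : (Int × Int)) : Prop :=
  0 ≤ p.1 ∧ p.1 < (board.length : Int) ∧ 0 ≤ p.2 ∧
    p.2 < (((board.getD p.1.toNat "").toList.length : Nat) : Int)

def allPosN : List String → Int → List (Int × Int)
  | [], _ => []
  | r :: rest, i => (List.range r.toList.length).map (fun j : Nat => ((i : Int), (j : Int))) ++ allPosN rest (i + 1)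

lemma bmap_length (board : List String) : (bmap board).length = board.length := by simp [bmap]

lemma bmap_getD (board : List String) (n : Nat) :
    (bmap board).getD n [] = (board.getD n "").toList := by
  simp only [bmap, List.getD, List.getElem?_map]
  cases board[n]? <;> rfl

lemma mem_allPosN (board : List String) (i : Int) (p : (Int × Int)) :
    p ∈ allPosN board i ↔
      ∃ k : Nat, k < board.length ∧ p.1 = i + k ∧ 0 ≤ p.2 ∧
        p.2 < ((board.getD k "").toList.length : Int) := by
  induction board generalizing i with
  | nil => simp [allPosN]
  | cons r rest ih =>
    constructor
    · intro h
      rcases List.mem_append.mp h with h | h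
      · obtain ⟨j, hj, hp⟩ := List.mem_map.mp h
        have hjlt := List.mem_range.mp hj
        subst hp
        refine ⟨0, by simp, by simp, by simp, ?_⟩
        rw [List.getD_cons_zero]
        show (j : Int) < _
        exact_mod_cast hjlt
      · obtain ⟨k, hk, h1, h2, h3⟩ := (ih (i + 1)).mp h
        refine ⟨k + 1, by simpa using hk, by push_cast at h1 ⊢; omega, h2, ?_⟩
        rw [List.getD_cons_succ]
        exact h3
    · rintro ⟨k, hk, h1, h2, h3⟩
      cases k with
      | zero =>
        apply List.mem_append.mpr
        left
        apply List.mem_map.mpr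
        refine ⟨p.2.toNat, List.mem_range.mpr ?_, ?_⟩
        · rw [List.getD_cons_zero] at h3
          omega
        · have h1' : p.1 = i := by simpa using h1
          have h2' : ((p.2.toNat : Nat) : Int) = p.2 := Int.toNat_of_nonneg h2
          calc (i, ((p.2.toNat : Nat) : Int)) = (p.1, p.2) := by rw [h1', h2']
            _ = p := rfl
      | succ k =>
        apply List.mem_append.mpr
        right
        refine (ih (i + 1)).mpr ⟨k, by simpa using hk, by push_cast at h1 ⊢; omega, h2, ?_⟩
        rw [List.getD_cons_succ] at h3
        exact h3

lemma mem_allPosN_zero (board : List String) (p : (Int × Int)) :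
    p ∈ allPosN board 0 ↔ Vd board p := by
  rw [mem_allPosN]
  unfold Vd
  constructor
  · rintro ⟨k, hk, h1, h2, h3⟩
    have hpk : p.1.toNat = k := by omega
    refine ⟨by omega, by omega, h2, by rw [hpk]; exact_mod_cast h3⟩
  · rintro ⟨h0, h1, h2, h3⟩
    exact ⟨p.1.toNat, by omega, by omega, h2, by exact_mod_cast h3⟩

def sTot (board : List String) : Nat := (board.map (fun r => r.toList.length)).sum

lemma length_allPosN (board : List String) (i : Int) :
    (allPosN board i).length = sTot board := by
  induction board generalizing i with
  | nil => rfl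
  | cons r rest ih => simp [allPosN, sTot, ih]

lemma nodupValid_le (board : List String) (L : List (Int × Int))
    (hnd : L.Nodup) (hV : ∀ p ∈ L, Vd board p) : L.length ≤ sTot board := by
  have hsub : L ⊆ allPosN board 0 := fun p hp => (mem_allPosN_zero board p).mpr (hV p hp)
  have := (List.Nodup.subperm hnd hsub).length_le
  rw [length_allPosN] at this
  exact this

lemma card_bound (board : List String) (gl : (Int × Int)) (V : List (Int × Int))
    (hnd : V.Nodup) (hgl : gl ∉ V) (hV : ∀ p ∈ V, Vd board p) (hg : Vd board gl) :
    V.length + 1 ≤ sTot board := by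
  have hnd2 : (gl :: V).Nodup := List.nodup_cons.mpr ⟨hgl, hnd⟩
  have := nodupValid_le board (gl :: V) hnd2 (by
    intro p hp
    rcases List.mem_cons.mp hp with rfl | hp
    · exact hg
    · exact hV p hp)
  simpa using this

lemma str_pyGet_eq (s : String) (i : Int) (h : 0 ≤ i) (h2 : i.toNat < s.toList.length) :
    PySem.Str.pyGet? s i = some (s.toList.getD i.toNat ' ') := by
  rw [show PySem.Str.pyGet? s i = PySem.List.pyGet? s.toList i by simp [pysem]]
  rw [PySem.List.pyGet?_of_nonneg _ h, List.getElem?_eq_getElem h2, List.getD,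
    List.getElem?_eq_getElem h2]
  rfl

lemma str_len_int (s : String) : PySem.Str.len s = (s.toList.length : Int) := by
  simp [pysem]

lemma move_eq_slide (board : List String) (di dj : Int) :
    ∀ (f : Nat) (i j : Int),
      moveA (bmap board) di dj f i j = slideB board di dj f i j := by
  intro f
  induction f with
  | zero => intro i j; rfl
  | succ f ih =>
    intro i j
    show (if _ then moveA (bmap board) di dj f (i + di) (j + dj) else ((i, j) : (Int × Int))) = _
    rw [slideB]
    simp only [bmap_length, bmap_getD, str_len_int]
    by_cases hb : 0 ≤ i + di ∧ i + di < (board.length : Int) ∧ 0 ≤ j + dj ∧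
        j + dj < ((board.getD (i + di).toNat "").toList.length : Int)
    · obtain ⟨h1, h2, h3, h4⟩ := hb
      have hidx : (j + dj).toNat < (board.getD (i + di).toNat "").toList.length := by omega
      rw [str_pyGet_eq _ _ h3 hidx]
      by_cases hc : (board.getD (i + di).toNat "").toList.getD (j + dj).toNat ' ' = 'D'
      · rw [if_neg (by tauto), if_pos (by right; rw [hc])]
      · rw [if_pos ⟨h1, h2, h3, h4, hc⟩, if_neg (by
          rintro (hx | hx)
          · exact hx ⟨h1, h2, h3, h4⟩
          · exact hc (Option.some_inj.mp hx))]
        exact ih (i + di) (j + dj)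
    · rw [if_neg (by tauto), if_pos (Or.inl hb)]

lemma slide_valid (board : List String) (di dj : Int) :
    ∀ (f : Nat) (i j : Int), Vd board (i, j) → Vd board (slideB board di dj f i j) := by
  intro f
  induction f with
  | zero => intro i j h; exact h
  | succ f ih =>
    intro i j h
    rw [slideB]
    by_cases hb : 0 ≤ i + di ∧ i + di < (board.length : Int) ∧ 0 ≤ j + dj ∧
        j + dj < PySem.Str.len (board.getD (i + di).toNat "")
    · by_cases hc : PySem.Str.pyGet? (board.getD (i + di).toNat "") (j + dj) = some 'D'
      · rw [if_pos (Or.inr hc)]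
        exact h
      · rw [if_neg (by tauto)]
        have hv : Vd board (i + di, j + dj) := by
          rw [str_len_int] at hb
          exact ⟨hb.1, hb.2.1, hb.2.2.1, hb.2.2.2⟩
        exact ih (i + di) (j + dj) hv
    · rw [if_pos (Or.inl hb)]
      exact h

lemma contains_false {V : PySem.Set (Int × Int)} {x : (Int × Int)} (h : ¬ (PySem.Set.contains V x = true)) :
    x ∉ V := fun hm => h ((PySem.Set.contains_iff V x).mpr hm)

-- ----- the level-synchronous intermediate form of A's BFS (proof-side only) -----

def expandL (board : List String) (gl : (Int × Int)) (fm : Nat) (x : (Int × Int)) :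
    List (Int × Int) → PySem.Set (Int × Int) → List (Int × Int) → Sum Unit (PySem.Set (Int × Int) × List (Int × Int))
  | [], V, nxt => .inr (V, nxt)
  | d :: ds, V, nxt =>
    let dst := slideB board d.1 d.2 fm x.1 x.2
    if dst = gl then .inl ()
    else if PySem.Set.contains V dst then expandL board gl fm x ds V nxt
    else expandL board gl fm x ds (PySem.Set.add V dst) (nxt ++ [dst])

def levelL (board : List String) (gl : (Int × Int)) (fm : Nat) :
    List (Int × Int) → PySem.Set (Int × Int) → List (Int × Int) → Sum Unit (PySem.Set (Int × Int) × List (Int × Int))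
  | [], V, nxt => .inr (V, nxt)
  | x :: xs, V, nxt =>
    match expandL board gl fm x dirs4B V nxt with
    | .inl _ => .inl ()
    | .inr (V', nxt') => levelL board gl fm xs V' nxt'

def bfsL (board : List String) (gl : (Int × Int)) (fm : Nat) :
    Nat → List (Int × Int) → PySem.Set (Int × Int) → Int → Int
  | _, [], _, _ => -1
  | 0, _ :: _, _, _ => -1
  | f + 1, x :: xs, V, depth =>
    match levelL board gl fm (x :: xs) V [] with
    | .inl _ => depth + 1
    | .inr (V', nxt) => bfsL board gl fm f nxt V' (depth + 1)

lemma expandL_inr (board : List String) (gl : (Int × Int)) (fm : Nat) (x : (Int × Int)) :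
    ∀ (ds : List (Int × Int)) (V : PySem.Set (Int × Int)) (acc : List (Int × Int))
      (V' : PySem.Set (Int × Int)) (acc' : List (Int × Int)),
      expandL board gl fm x ds V acc = .inr (V', acc') →
      ∃ fresh : List (Int × Int), V' = V ++ fresh ∧ acc' = acc ++ fresh ∧
        ∀ p ∈ fresh, p ∉ V ∧ p ≠ gl ∧ (Vd board x → Vd board p) := by
  intro ds
  induction ds with
  | nil =>
    intro V acc V' acc' h
    simp only [expandL, Sum.inr.injEq, Prod.mk.injEq] at h
    exact ⟨[], by simp [h.1], by simp [h.2], by simp⟩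
  | cons d ds ih =>
    intro V acc V' acc' h
    rw [expandL] at h
    by_cases h1 : slideB board d.1 d.2 fm x.1 x.2 = gl
    · rw [if_pos h1] at h
      exact absurd h (by simp)
    · rw [if_neg h1] at h
      by_cases h2 : PySem.Set.contains V (slideB board d.1 d.2 fm x.1 x.2) = true
      · rw [if_pos h2] at h
        exact ih V acc V' acc' h
      · rw [if_neg h2] at h
        have hnm := contains_false h2
        rw [PySem.Set.add_of_not_mem hnm] at h
        obtain ⟨fresh', hV, hacc, hp⟩ := ih _ _ _ _ h
        refine ⟨slideB board d.1 d.2 fm x.1 x.2 :: fresh', by simp [hV], by simp [hacc], ?_⟩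
        intro p hpm
        rcases List.mem_cons.mp hpm with rfl | hpm
        · exact ⟨hnm, h1, fun hx => slide_valid board d.1 d.2 fm x.1 x.2 hx⟩
        · obtain ⟨ha, hb, hc⟩ := hp p hpm
          exact ⟨fun hm => ha (by simp [hm]), hb, hc⟩

lemma expandL_nodup (board : List String) (gl : (Int × Int)) (fm : Nat) (x : (Int × Int)) :
    ∀ (ds : List (Int × Int)) (V : PySem.Set (Int × Int)) (acc : List (Int × Int))
      (V' : PySem.Set (Int × Int)) (acc' : List (Int × Int)),
      V.Nodup → expandL board gl fm x ds V acc = .inr (V', acc') → V'.Nodup := by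
  intro ds
  induction ds with
  | nil =>
    intro V acc V' acc' hnd h
    simp only [expandL, Sum.inr.injEq, Prod.mk.injEq] at h
    rw [← h.1]; exact hnd
  | cons d ds ih =>
    intro V acc V' acc' hnd h
    rw [expandL] at h
    by_cases h1 : slideB board d.1 d.2 fm x.1 x.2 = gl
    · rw [if_pos h1] at h
      exact absurd h (by simp)
    · rw [if_neg h1] at h
      by_cases h2 : PySem.Set.contains V (slideB board d.1 d.2 fm x.1 x.2) = true
      · rw [if_pos h2] at h
        exact ih V acc V' acc' hnd h
      · rw [if_neg h2] at h
        exact ih _ _ _ _ (PySem.Set.nodup_add V _ hnd) h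

lemma levelL_inr (board : List String) (gl : (Int × Int)) (fm : Nat) :
    ∀ (xs : List (Int × Int)) (V : PySem.Set (Int × Int)) (acc : List (Int × Int))
      (V' : PySem.Set (Int × Int)) (acc' : List (Int × Int)),
      levelL board gl fm xs V acc = .inr (V', acc') →
      ∃ fresh : List (Int × Int), V' = V ++ fresh ∧ acc' = acc ++ fresh ∧
        ∀ p ∈ fresh, p ∉ V ∧ p ≠ gl ∧ ((∀ y ∈ xs, Vd board y) → Vd board p) := by
  intro xs
  induction xs with
  | nil =>
    intro V acc V' acc' h
    simp only [levelL, Sum.inr.injEq, Prod.mk.injEq] at h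
    exact ⟨[], by simp [h.1], by simp [h.2], by simp⟩
  | cons y ys ih =>
    intro V acc V' acc' h
    rw [levelL] at h
    cases he : expandL board gl fm y dirs4B V acc with
    | inl u => rw [he] at h; exact absurd h (by simp)
    | inr w =>
      rw [he] at h
      obtain ⟨f1, hV1, ha1, hp1⟩ := expandL_inr board gl fm y dirs4B V acc w.1 w.2 (by rw [he])
      obtain ⟨f2, hV2, ha2, hp2⟩ := ih w.1 w.2 V' acc' h
      refine ⟨f1 ++ f2, by rw [hV2, hV1, List.append_assoc], by rw [ha2, ha1, List.append_assoc], ?_⟩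
      intro p hpm
      rcases List.mem_append.mp hpm with hpm | hpm
      · obtain ⟨ha, hb, hc⟩ := hp1 p hpm
        exact ⟨ha, hb, fun hxs => hc (hxs y (by simp))⟩
      · obtain ⟨ha, hb, hc⟩ := hp2 p hpm
        refine ⟨fun hm => ha (by rw [hV1]; simp [hm]), hb, fun hxs => hc ?_⟩
        intro z hz
        exact hxs z (by simp [hz])

lemma levelL_nodup (board : List String) (gl : (Int × Int)) (fm : Nat) :
    ∀ (xs : List (Int × Int)) (V : PySem.Set (Int × Int)) (acc : List (Int × Int))
      (V' : PySem.Set (Int × Int)) (acc' : List (Int × Int)),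
      V.Nodup → levelL board gl fm xs V acc = .inr (V', acc') → V'.Nodup := by
  intro xs
  induction xs with
  | nil =>
    intro V acc V' acc' hnd h
    simp only [levelL, Sum.inr.injEq, Prod.mk.injEq] at h
    rw [← h.1]; exact hnd
  | cons y ys ih =>
    intro V acc V' acc' hnd h
    rw [levelL] at h
    cases he : expandL board gl fm y dirs4B V acc with
    | inl u => rw [he] at h; exact absurd h (by simp)
    | inr w =>
      rw [he] at h
      exact ih w.1 w.2 V' acc' (expandL_nodup board gl fm y dirs4B V acc w.1 w.2 hnd (by rw [he])) h

lemma bfsA_nil (grid : List (List Char)) (gl : (Int × Int)) (fm fa : Nat) (V : PySem.Set (Int × Int)) :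
    bfsA grid gl fm fa [] V = -1 := by cases fa <;> rfl

lemma bfsL_nil (board : List String) (gl : (Int × Int)) (fm k : Nat) (V : PySem.Set (Int × Int)) (d : Int) :
    bfsL board gl fm k [] V d = -1 := by cases k <;> rfl

lemma dirs_corr (board : List String) (gl : (Int × Int)) (fm : Nat) (x : (Int × Int)) (s : Int) :
    ∀ (ds : List (Int × Int)) (V : PySem.Set (Int × Int)) (acc : List (Int × Int)) (q0 : List ((Int × Int) × Int)),
      gl ∉ V →
      dirsA (bmap board) gl fm x s ds V (q0 ++ acc.map (fun p => (p, s + 1))) =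
        (match expandL board gl fm x ds V acc with
         | .inl _ => .inl (s + 1)
         | .inr (V', acc') => .inr (V', q0 ++ acc'.map (fun p => (p, s + 1)))) := by
  intro ds
  induction ds with
  | nil =>
    intro V acc q0 hgl
    rfl
  | cons d ds ih =>
    intro V acc q0 hgl
    rw [dirsA, expandL]
    simp only [move_eq_slide board d.1 d.2 fm x.1 x.2]
    by_cases hc : PySem.Set.contains V (slideB board d.1 d.2 fm x.1 x.2) = true
    · have hne : ¬ (slideB board d.1 d.2 fm x.1 x.2 = gl) := by
        intro he
        exact hgl (he ▸ (PySem.Set.contains_iff V _).mp hc)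
      rw [if_pos hc, if_neg hne, if_pos hc]
      exact ih V acc q0 hgl
    · rw [if_neg hc]
      by_cases h1 : slideB board d.1 d.2 fm x.1 x.2 = gl
      · rw [if_pos h1, if_pos h1]
      · rw [if_neg h1, if_neg h1, if_neg hc]
        have hgl' : gl ∉ PySem.Set.add V (slideB board d.1 d.2 fm x.1 x.2) := by
          intro hm
          rcases (PySem.Set.mem_add _ _ _).mp hm with hm | hm
          · exact hgl hm
          · exact h1 hm.symm
        have := ih (PySem.Set.add V (slideB board d.1 d.2 fm x.1 x.2)) (acc ++ [slideB board d.1 d.2 fm x.1 x.2]) q0 hgl'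
        rw [List.map_append, ← List.append_assoc] at this
        simpa using this

lemma level_corr (board : List String) (gl : (Int × Int)) (fm : Nat) (s : Int) :
    ∀ (l1 : List (Int × Int)) (V : PySem.Set (Int × Int)) (acc : List (Int × Int)) (fa : Nat),
      gl ∉ V →
      bfsA (bmap board) gl fm (fa + l1.length)
          (l1.map (fun p => (p, s)) ++ acc.map (fun p => (p, s + 1))) V =
        (match levelL board gl fm l1 V acc with
         | .inl _ => s + 1
         | .inr (V', acc') =>
            bfsA (bmap board) gl fm fa (acc'.map (fun p => (p, s + 1))) V') := by
  intro l1
  induction l1 with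
  | nil =>
    intro V acc fa hgl
    simp [levelL]
  | cons x xs ih =>
    intro V acc fa hgl
    have hfu : fa + (x :: xs).length = (fa + xs.length) + 1 := by
      simp [Nat.add_assoc]
    rw [hfu]
    show (match dirsA (bmap board) gl fm x s dirsConstA V
        (xs.map (fun p => (p, s)) ++ acc.map (fun p => (p, s + 1))) with
      | .inl r => r
      | .inr (V', q') => bfsA (bmap board) gl fm (fa + xs.length) q' V') = _
    rw [show dirsConstA = dirs4B from rfl,
      dirs_corr board gl fm x s dirs4B V acc (xs.map (fun p => (p, s))) hgl]
    rw [levelL]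
    cases he : expandL board gl fm x dirs4B V acc with
    | inl u => rfl
    | inr w =>
      obtain ⟨fresh, hV1, -, hp⟩ := expandL_inr board gl fm x dirs4B V acc w.1 w.2 he
      have hgl1 : gl ∉ w.1 := by
        rw [hV1]
        intro hm
        rcases List.mem_append.mp hm with hm | hm
        · exact hgl hm
        · exact (hp gl hm).2.1 rfl
      exact ih w.1 w.2 fa hgl1

lemma main_corr (board : List String) (gl : (Int × Int)) (fm : Nat) (hg : Vd board gl) :
    ∀ (k : Nat) (fa : Nat) (frontier : List (Int × Int)) (V : PySem.Set (Int × Int)) (s : Int),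
      gl ∉ V → V.Nodup → (∀ p ∈ V, Vd board p) → (∀ p ∈ frontier, Vd board p) →
      frontier.length + sTot board ≤ fa + V.length + 1 →
      sTot board ≤ k + V.length →
      bfsA (bmap board) gl fm fa (frontier.map (fun p => (p, s))) V =
        bfsL board gl fm k frontier V s := by
  intro k
  induction k with
  | zero =>
    intro fa frontier V s hgl hnd hV hfr hfa hk
    cases frontier with
    | nil => rw [List.map_nil, bfsA_nil, bfsL_nil]
    | cons y ys =>
      have := card_bound board gl V hnd hgl hV hg
      omega
  | succ k ih =>
    intro fa frontier V s hgl hnd hV hfr hfa hk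
    cases frontier with
    | nil => rw [List.map_nil, bfsA_nil, bfsL_nil]
    | cons y ys =>
      have hcard := card_bound board gl V hnd hgl hV hg
      have hflen : (y :: ys).length ≤ fa := by
        have := List.length_cons (a := y) (as := ys)
        omega
      obtain ⟨fa', rfl⟩ : ∃ fa', fa = fa' + (y :: ys).length :=
        ⟨fa - (y :: ys).length, by omega⟩
      have hstep := level_corr board gl fm s (y :: ys) V [] fa' hgl
      rw [List.map_nil, List.append_nil] at hstep
      rw [hstep]
      show _ = (match levelL board gl fm (y :: ys) V [] with
        | .inl _ => s + 1
        | .inr (V', nxt) => bfsL board gl fm k nxt V' (s + 1))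
      cases he : levelL board gl fm (y :: ys) V [] with
      | inl u => rfl
      | inr w =>
        obtain ⟨V1, nxt⟩ := w
        show bfsA (bmap board) gl fm fa' (List.map (fun p => (p, s + 1)) nxt) V1 =
          bfsL board gl fm k nxt V1 (s + 1)
        obtain ⟨fresh, hV1, hacc1, hp⟩ := levelL_inr board gl fm (y :: ys) V [] V1 nxt he
        rw [List.nil_append] at hacc1
        cases hw2 : nxt with
        | nil => rw [List.map_nil, bfsA_nil, bfsL_nil]
        | cons z zs =>
          have hgl1 : gl ∉ V1 := by
            rw [hV1]
            intro hm
            rcases List.mem_append.mp hm with hm | hm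
            · exact hgl hm
            · exact (hp gl hm).2.1 rfl
          have hnd1 : V1.Nodup := levelL_nodup board gl fm (y :: ys) V [] V1 nxt hnd he
          have hV1' : ∀ p ∈ V1, Vd board p := by
            intro p hm
            rw [hV1] at hm
            rcases List.mem_append.mp hm with hm | hm
            · exact hV p hm
            · exact (hp p hm).2.2 hfr
          have hfr1 : ∀ p ∈ nxt, Vd board p := by
            intro p hm
            rw [hacc1] at hm
            exact (hp p hm).2.2 hfr
          have hlen1 : V1.length = V.length + fresh.length := by
            rw [hV1, List.length_append]
          have hfl : nxt.length = fresh.length := by rw [hacc1]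
          have hfpos : 1 ≤ fresh.length := by
            rw [← hfl, hw2]
            simp
          rw [← hw2]
          apply ih fa' nxt V1 (s + 1) hgl1 hnd1 hV1' hfr1
          · have := List.length_cons (a := y) (as := ys)
            omega
          · omega

-- ----- the slide-walk spec: reachL k = cells reachable in exactly k slides -----

def succsL (board : List String) (fm : Nat) (x : (Int × Int)) : List (Int × Int) :=
  dirs4B.map (fun d => slideB board d.1 d.2 fm x.1 x.2)

def reachL (board : List String) (st : (Int × Int)) (fm : Nat) : Nat → List (Int × Int)
  | 0 => [st]
  | k + 1 => (reachL board st fm k).flatMap (succsL board fm)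

-- p is reachable in exactly k slides and in no smaller number
def minW (board : List String) (st : (Int × Int)) (fm : Nat) (p : (Int × Int)) (k : Nat) : Prop :=
  p ∈ reachL board st fm k ∧ ∀ j < k, p ∉ reachL board st fm j

lemma mem_succsL (board : List String) (fm : Nat) (q p : (Int × Int)) :
    p ∈ succsL board fm q ↔ ∃ d ∈ dirs4B, slideB board d.1 d.2 fm q.1 q.2 = p := by
  simp [succsL]

lemma mem_reach_succ (board : List String) (st : (Int × Int)) (fm : Nat) (k : Nat) (p : (Int × Int)) :
    p ∈ reachL board st fm (k + 1) ↔ ∃ q ∈ reachL board st fm k, p ∈ succsL board fm q := by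
  rw [reachL]
  exact List.mem_flatMap

lemma reach_valid (board : List String) (st : (Int × Int)) (fm : Nat) (hst : Vd board st) :
    ∀ (k : Nat) (p : (Int × Int)), p ∈ reachL board st fm k → Vd board p := by
  intro k
  induction k with
  | zero =>
    intro p hp
    rw [show reachL board st fm 0 = [st] from rfl] at hp
    rw [List.mem_singleton.mp hp]
    exact hst
  | succ k ih =>
    intro p hp
    obtain ⟨q, hq, hpq⟩ := (mem_reach_succ board st fm k p).mp hp
    obtain ⟨d, -, rfl⟩ := (mem_succsL board fm q p).mp hpq
    exact slide_valid board d.1 d.2 fm q.1 q.2 (ih q hq)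

lemma minW_of_mem (board : List String) (st : (Int × Int)) (fm : Nat) (p : (Int × Int)) (k : Nat)
    (hp : p ∈ reachL board st fm k) : ∃ m ≤ k, minW board st fm p m := by
  haveI : DecidablePred (fun j => p ∈ reachL board st fm j) := fun j => by infer_instance
  have h : ∃ j, p ∈ reachL board st fm j := ⟨k, hp⟩
  exact ⟨Nat.find h, Nat.find_min' h hp, Nat.find_spec h, fun j hj => Nat.find_min h hj⟩

lemma minW_unique (board : List String) (st : (Int × Int)) (fm : Nat) (p : (Int × Int)) (j j' : Nat)
    (h1 : minW board st fm p j) (h2 : minW board st fm p j') : j = j' := by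
  rcases lt_trichotomy j j' with h | h | h
  · exact absurd h1.1 (h2.2 j h)
  · exact h
  · exact absurd h2.1 (h1.2 j' h)

lemma minW_pred (board : List String) (st : (Int × Int)) (fm : Nat) (p : (Int × Int)) (t : Nat)
    (h : minW board st fm p (t + 1)) :
    ∃ q, minW board st fm q t ∧ p ∈ succsL board fm q := by
  obtain ⟨q, hq, hpq⟩ := (mem_reach_succ board st fm t p).mp h.1
  obtain ⟨s, hs, hmq⟩ := minW_of_mem board st fm q t hq
  rcases Nat.lt_or_ge s t with hlt | hge
  · exfalso
    have : p ∈ reachL board st fm (s + 1) :=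
      (mem_reach_succ board st fm s p).mpr ⟨q, hmq.1, hpq⟩
    exact h.2 (s + 1) (by omega) this
  · have : s = t := by omega
    subst this
    exact ⟨q, hmq, hpq⟩

lemma minW_level_exists (board : List String) (st : (Int × Int)) (fm : Nat) :
    ∀ (m : Nat) (p : (Int × Int)), minW board st fm p m →
      ∀ j ≤ m, ∃ q, minW board st fm q j := by
  intro m
  induction m with
  | zero =>
    intro p hp j hj
    interval_cases j
    exact ⟨p, hp⟩
  | succ m ih =>
    intro p hp j hj
    rcases Nat.lt_or_ge j (m + 1) with hlt | hge
    · obtain ⟨q, hq, -⟩ := minW_pred board st fm p m hp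
      exact ih q hq j (by omega)
    · have : j = m + 1 := by omega
      subst this
      exact ⟨p, hp⟩

lemma minW_bound (board : List String) (st : (Int × Int)) (fm : Nat) (hst : Vd board st)
    (p : (Int × Int)) (t : Nat) (h : minW board st fm p t) : t + 1 ≤ sTot board := by
  have hlev : ∀ j : Fin (t + 1), ∃ q, minW board st fm q j :=
    fun j => minW_level_exists board st fm t p h j (by omega)
  let f : Fin (t + 1) → (Int × Int) := fun j => Classical.choose (hlev j)
  have hf : ∀ j, minW board st fm (f j) j := fun j => Classical.choose_spec (hlev j)
  have hinj : Function.Injective f := by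
    intro i j hij
    have := minW_unique board st fm (f i) i j (hf i) (hij ▸ hf j)
    exact Fin.ext this
  have hnd : (List.ofFn f).Nodup := List.nodup_ofFn.mpr hinj
  have hval : ∀ q ∈ List.ofFn f, Vd board q := by
    intro q hq
    obtain ⟨j, rfl⟩ := List.mem_ofFn.mp hq
    exact reach_valid board st fm hst j (f j) (hf j).1
  have := nodupValid_le board (List.ofFn f) hnd hval
  rwa [List.length_ofFn] at this

-- ----- B's loop computes: first k with gl ∈ reachL k, bounded by sTot -----

lemma flatMap_mem_congr {l l' : List (Int × Int)} (f : (Int × Int) → List (Int × Int))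
    (h : ∀ p, p ∈ l ↔ p ∈ l') (p : (Int × Int)) :
    p ∈ l.flatMap f ↔ p ∈ l'.flatMap f := by
  rw [List.mem_flatMap, List.mem_flatMap]
  exact ⟨fun ⟨a, ha, hp⟩ => ⟨a, (h a).mp ha, hp⟩, fun ⟨a, ha, hp⟩ => ⟨a, (h a).mpr ha, hp⟩⟩

lemma loopB_step_mem (board : List String) (st : (Int × Int)) (fm : Nat) (d : Nat)
    (reach : PySem.Set (Int × Int)) (hmem : ∀ p, p ∈ reach ↔ p ∈ reachL board st fm d)
    (p : (Int × Int)) :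
    p ∈ PySem.Set.ofList (reach.flatMap
        (fun c => dirs4B.map (fun dr => slideB board dr.1 dr.2 fm c.1 c.2))) ↔
      p ∈ reachL board st fm (d + 1) := by
  rw [PySem.Set.mem_ofList]
  rw [show (reach.flatMap (fun c => dirs4B.map (fun dr => slideB board dr.1 dr.2 fm c.1 c.2)))
      = reach.flatMap (succsL board fm) from rfl]
  rw [show reachL board st fm (d + 1) = (reachL board st fm d).flatMap (succsL board fm) from rfl]
  exact flatMap_mem_congr (succsL board fm) hmem p

lemma loopB_reaches (board : List String) (st gl : (Int × Int)) (fm : Nat) (m : Nat)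
    (hm : minW board st fm gl m) :
    ∀ (t d : Nat) (reach : PySem.Set (Int × Int)),
      (∀ p, p ∈ reach ↔ p ∈ reachL board st fm d) → d < m → m ≤ d + t →
      loopB board gl fm t ((d : Int) + 1) reach = (m : Int) := by
  intro t
  induction t with
  | zero => intro d reach _ h1 h2; omega
  | succ t ih =>
    intro d reach hmem hdm hmt
    rw [loopB]
    have hr' := loopB_step_mem board st fm d reach hmem
    by_cases he : d + 1 = m
    · have hgl : gl ∈ reachL board st fm (d + 1) := by rw [he]; exact hm.1
      rw [if_pos ((PySem.Set.contains_iff _ _).mpr ((hr' gl).mpr hgl))]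
      omega
    · have hgl : gl ∉ reachL board st fm (d + 1) := hm.2 (d + 1) (by omega)
      rw [if_neg (fun hc => hgl ((hr' gl).mp ((PySem.Set.contains_iff _ _).mp hc)))]
      have := ih (d + 1) _ hr' (by omega) (by omega)
      rw [show ((d : Int) + 1) + 1 = ((d + 1 : Nat) : Int) + 1 by push_cast; ring]
      exact this

lemma loopB_unreach (board : List String) (st gl : (Int × Int)) (fm : Nat)
    (hun : ∀ k, gl ∉ reachL board st fm k) :
    ∀ (t : Nat) (kk : Int) (d : Nat) (reach : PySem.Set (Int × Int)),
      (∀ p, p ∈ reach ↔ p ∈ reachL board st fm d) →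
      loopB board gl fm t kk reach = -1 := by
  intro t
  induction t with
  | zero => intro kk d reach _; rfl
  | succ t ih =>
    intro kk d reach hmem
    rw [loopB]
    have hr' := loopB_step_mem board st fm d reach hmem
    rw [if_neg (fun hc => hun (d + 1) ((hr' gl).mp ((PySem.Set.contains_iff _ _).mp hc)))]
    exact ih (kk + 1) (d + 1) _ hr'

-- ----- A's level BFS computes the same spec -----

lemma expandL_inl_iff (board : List String) (gl : (Int × Int)) (fm : Nat) (x : (Int × Int)) :
    ∀ (ds : List (Int × Int)) (V : PySem.Set (Int × Int)) (acc : List (Int × Int)),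
      expandL board gl fm x ds V acc = .inl () ↔
        ∃ d ∈ ds, slideB board d.1 d.2 fm x.1 x.2 = gl := by
  intro ds
  induction ds with
  | nil => intro V acc; simp [expandL]
  | cons d ds ih =>
    intro V acc
    rw [expandL]
    simp only [List.mem_cons, exists_eq_or_imp]
    by_cases h1 : slideB board d.1 d.2 fm x.1 x.2 = gl
    · simp [h1]
    · rw [if_neg h1]
      by_cases h2 : PySem.Set.contains V (slideB board d.1 d.2 fm x.1 x.2) = true
      · rw [if_pos h2, ih]
        simp [h1]
      · rw [if_neg h2, ih]
        simp [h1]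

lemma expandL_inr_mem (board : List String) (gl : (Int × Int)) (fm : Nat) (x : (Int × Int)) :
    ∀ (ds : List (Int × Int)) (V : PySem.Set (Int × Int)) (acc : List (Int × Int))
      (V' : PySem.Set (Int × Int)) (acc' : List (Int × Int)),
      expandL board gl fm x ds V acc = .inr (V', acc') →
      ∀ p, (p ∈ V' ↔ p ∈ V ∨ ∃ d ∈ ds, slideB board d.1 d.2 fm x.1 x.2 = p) ∧
        (p ∈ acc' ↔ p ∈ acc ∨ (p ∉ V ∧ ∃ d ∈ ds, slideB board d.1 d.2 fm x.1 x.2 = p)) := by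
  intro ds
  induction ds with
  | nil =>
    intro V acc V' acc' h p
    simp only [expandL, Sum.inr.injEq, Prod.mk.injEq] at h
    rw [← h.1, ← h.2]
    simp
  | cons d ds ih =>
    intro V acc V' acc' h p
    rw [expandL] at h
    by_cases h1 : slideB board d.1 d.2 fm x.1 x.2 = gl
    · rw [if_pos h1] at h
      exact absurd h (by simp)
    · rw [if_neg h1] at h
      simp only [List.mem_cons, exists_eq_or_imp]
      by_cases h2 : PySem.Set.contains V (slideB board d.1 d.2 fm x.1 x.2) = true
      · rw [if_pos h2] at h
        have hdst : slideB board d.1 d.2 fm x.1 x.2 ∈ V := (PySem.Set.contains_iff _ _).mp h2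
        have hih := ih V acc V' acc' h p
        constructor
        · rw [hih.1]
          constructor
          · rintro (hp | hp)
            · exact Or.inl hp
            · exact Or.inr (Or.inr hp)
          · rintro (hp | hp | hp)
            · exact Or.inl hp
            · exact Or.inl (hp ▸ hdst)
            · exact Or.inr hp
        · rw [hih.2]
          constructor
          · rintro (hp | ⟨hnv, hp⟩)
            · exact Or.inl hp
            · exact Or.inr ⟨hnv, Or.inr hp⟩
          · rintro (hp | ⟨hnv, hp | hp⟩)
            · exact Or.inl hp
            · exact absurd (hp ▸ hdst) hnv
            · exact Or.inr ⟨hnv, hp⟩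
      · rw [if_neg h2] at h
        have hdst : slideB board d.1 d.2 fm x.1 x.2 ∉ V := contains_false h2
        rw [PySem.Set.add_of_not_mem hdst] at h
        have hih := ih (V ++ [slideB board d.1 d.2 fm x.1 x.2]) (acc ++ [slideB board d.1 d.2 fm x.1 x.2]) V' acc' h p
        have hmemV : p ∈ V ++ [slideB board d.1 d.2 fm x.1 x.2] ↔
            p ∈ V ∨ slideB board d.1 d.2 fm x.1 x.2 = p := by
          rw [List.mem_append, List.mem_singleton]
          constructor
          · rintro (h | h)
            · tauto
            · right; exact h.symm
          · rintro (h | h)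
            · tauto
            · right; exact h.symm
        have hmemA : p ∈ acc ++ [slideB board d.1 d.2 fm x.1 x.2] ↔
            p ∈ acc ∨ slideB board d.1 d.2 fm x.1 x.2 = p := by
          rw [List.mem_append, List.mem_singleton]
          constructor
          · rintro (h | h)
            · tauto
            · right; exact h.symm
          · rintro (h | h)
            · tauto
            · right; exact h.symm
        constructor
        · rw [hih.1, hmemV]
          constructor
          · rintro ((hp | hp) | hp)
            · exact Or.inl hp
            · exact Or.inr (Or.inl hp)
            · exact Or.inr (Or.inr hp)
          · rintro (hp | hp | hp)
            · exact Or.inl (Or.inl hp)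
            · exact Or.inl (Or.inr hp)
            · exact Or.inr hp
        · rw [hih.2, hmemA, hmemV]
          constructor
          · rintro ((hp | hp) | ⟨hnv, hp⟩)
            · exact Or.inl hp
            · exact Or.inr ⟨fun hv => hdst (hp ▸ hv), Or.inl hp⟩
            · exact Or.inr ⟨fun hv => hnv (Or.inl hv), Or.inr hp⟩
          · rintro (hp | ⟨hnv, hp | hp⟩)
            · exact Or.inl (Or.inl hp)
            · exact Or.inl (Or.inr hp)
            · by_cases hs : slideB board d.1 d.2 fm x.1 x.2 = p
              · exact Or.inl (Or.inr hs)
              · exact Or.inr ⟨fun hc => hc.elim hnv hs, hp⟩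

lemma levelL_inl_iff (board : List String) (gl : (Int × Int)) (fm : Nat) :
    ∀ (xs : List (Int × Int)) (V : PySem.Set (Int × Int)) (acc : List (Int × Int)),
      levelL board gl fm xs V acc = .inl () ↔
        ∃ x ∈ xs, ∃ d ∈ dirs4B, slideB board d.1 d.2 fm x.1 x.2 = gl := by
  intro xs
  induction xs with
  | nil => intro V acc; simp [levelL]
  | cons y ys ih =>
    intro V acc
    rw [levelL]
    simp only [List.mem_cons, exists_eq_or_imp]
    cases he : expandL board gl fm y dirs4B V acc with
    | inl u =>
      have := (expandL_inl_iff board gl fm y dirs4B V acc).mp (by rw [he])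
      simp [this]
    | inr w =>
      have hni : ¬ ∃ d ∈ dirs4B, slideB board d.1 d.2 fm y.1 y.2 = gl := by
        intro hc
        have := (expandL_inl_iff board gl fm y dirs4B V acc).mpr hc
        rw [he] at this
        exact absurd this (by simp)
      rw [ih]
      simp [hni]

lemma levelL_inr_mem (board : List String) (gl : (Int × Int)) (fm : Nat) :
    ∀ (xs : List (Int × Int)) (V : PySem.Set (Int × Int)) (acc : List (Int × Int))
      (V' : PySem.Set (Int × Int)) (acc' : List (Int × Int)),
      levelL board gl fm xs V acc = .inr (V', acc') →
      ∀ p, (p ∈ V' ↔ p ∈ V ∨ ∃ x ∈ xs, p ∈ succsL board fm x) ∧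
        (p ∈ acc' ↔ p ∈ acc ∨ (p ∉ V ∧ ∃ x ∈ xs, p ∈ succsL board fm x)) := by
  intro xs
  induction xs with
  | nil =>
    intro V acc V' acc' h p
    simp only [levelL, Sum.inr.injEq, Prod.mk.injEq] at h
    rw [← h.1, ← h.2]
    simp
  | cons y ys ih =>
    intro V acc V' acc' h p
    rw [levelL] at h
    cases he : expandL board gl fm y dirs4B V acc with
    | inl u => rw [he] at h; exact absurd h (by simp)
    | inr w =>
      rw [he] at h
      have hw := expandL_inr_mem board gl fm y dirs4B V acc w.1 w.2 he p
      have hih := ih w.1 w.2 V' acc' h p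
      have hsy : (∃ d ∈ dirs4B, slideB board d.1 d.2 fm y.1 y.2 = p) ↔ p ∈ succsL board fm y :=
        (mem_succsL board fm y p).symm
      simp only [List.mem_cons, exists_eq_or_imp]
      constructor
      · rw [hih.1, hw.1, hsy]
        constructor
        · rintro ((hp | hp) | hp)
          · exact Or.inl hp
          · exact Or.inr (Or.inl hp)
          · exact Or.inr (Or.inr hp)
        · rintro (hp | hp | hp)
          · exact Or.inl (Or.inl hp)
          · exact Or.inl (Or.inr hp)
          · exact Or.inr hp
      · rw [hih.2, hw.2, hw.1, hsy]
        constructor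
        · rintro ((hp | ⟨hn, hp⟩) | ⟨hn, hp⟩)
          · exact Or.inl hp
          · exact Or.inr ⟨hn, Or.inl hp⟩
          · exact Or.inr ⟨fun hv => hn (Or.inl hv), Or.inr hp⟩
        · rintro (hp | ⟨hn, hp | hp⟩)
          · exact Or.inl (Or.inl hp)
          · exact Or.inl (Or.inr ⟨hn, hp⟩)
          · by_cases hs : p ∈ succsL board fm y
            · exact Or.inl (Or.inr ⟨hn, hs⟩)
            · exact Or.inr ⟨fun hc => hc.elim hn hs, hp⟩

-- under the frontier invariant, the goal is hit during a level expansion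
-- exactly when it is reachable in d+1 slides
lemma frontier_goal_iff (board : List String) (st gl : (Int × Int)) (fm : Nat) (d : Nat)
    (F : List (Int × Int))
    (hF : ∀ p, p ∈ F ↔ minW board st fm p d ∧ p ≠ gl)
    (hup : ∀ j ≤ d, gl ∉ reachL board st fm j) :
    (∃ x ∈ F, ∃ dr ∈ dirs4B, slideB board dr.1 dr.2 fm x.1 x.2 = gl) ↔
      gl ∈ reachL board st fm (d + 1) := by
  constructor
  · rintro ⟨x, hx, hdr⟩
    have hmx := ((hF x).mp hx).1
    exact (mem_reach_succ board st fm d gl).mpr ⟨x, hmx.1, (mem_succsL board fm x gl).mpr hdr⟩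
  · intro hgl
    obtain ⟨m, hm, hmw⟩ := minW_of_mem board st fm gl (d + 1) hgl
    have hmd : m = d + 1 := by
      rcases Nat.lt_or_ge m (d + 1) with hlt | hge
      · exact absurd hmw.1 (hup m (by omega))
      · omega
    subst hmd
    obtain ⟨q, hq, hglq⟩ := minW_pred board st fm gl d hmw
    have hqg : q ≠ gl := fun he => hup d le_rfl (he ▸ hq.1)
    exact ⟨q, (hF q).mpr ⟨hq, hqg⟩, (mem_succsL board fm q gl).mp hglq⟩

-- advancing the level invariant through one .inr step
lemma step_inv (board : List String) (st gl : (Int × Int)) (fm : Nat) (d : Nat)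
    (F : List (Int × Int)) (V V' : PySem.Set (Int × Int)) (nxt : List (Int × Int))
    (hF : ∀ p, p ∈ F ↔ minW board st fm p d ∧ p ≠ gl)
    (hV : ∀ p, p ∈ V ↔ (∃ j ≤ d, p ∈ reachL board st fm j) ∧ p ≠ gl)
    (hup : ∀ j ≤ d, gl ∉ reachL board st fm j)
    (he : levelL board gl fm F V [] = .inr (V', nxt)) :
    (∀ p, p ∈ V' ↔ (∃ j ≤ d + 1, p ∈ reachL board st fm j) ∧ p ≠ gl) ∧
    (∀ p, p ∈ nxt ↔ minW board st fm p (d + 1) ∧ p ≠ gl) ∧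
    (∀ j ≤ d + 1, gl ∉ reachL board st fm j) := by
  have hgl1 : gl ∉ reachL board st fm (d + 1) := by
    intro hc
    have := (frontier_goal_iff board st gl fm d F hF hup).mpr hc
    have := (levelL_inl_iff board gl fm F V []).mpr this
    rw [he] at this
    exact absurd this (by simp)
  have hup1 : ∀ j ≤ d + 1, gl ∉ reachL board st fm j := by
    intro j hj
    rcases Nat.lt_or_ge j (d + 1) with hlt | hge
    · exact hup j (by omega)
    · have : j = d + 1 := by omega
      rw [this]; exact hgl1
  have hmem := levelL_inr_mem board gl fm F V [] V' nxt he
  -- a successor of a frontier cell is never the goal (else .inl)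
  have hsucc_ne : ∀ p, (∃ x ∈ F, p ∈ succsL board fm x) → p ≠ gl := by
    rintro p ⟨x, hx, hpx⟩ rfl
    exact hgl1 ((mem_reach_succ board st fm d p).mpr ⟨x, ((hF x).mp hx).1.1, hpx⟩)
  have hsucc_reach : ∀ p, (∃ x ∈ F, p ∈ succsL board fm x) → p ∈ reachL board st fm (d + 1) := by
    rintro p ⟨x, hx, hpx⟩
    exact (mem_reach_succ board st fm d p).mpr ⟨x, ((hF x).mp hx).1.1, hpx⟩
  refine ⟨?_, ?_, hup1⟩
  · intro p
    rw [(hmem p).1, hV p]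
    constructor
    · rintro (⟨⟨j, hj, hpj⟩, hpg⟩ | hs)
      · exact ⟨⟨j, by omega, hpj⟩, hpg⟩
      · exact ⟨⟨d + 1, le_rfl, hsucc_reach p hs⟩, hsucc_ne p hs⟩
    · rintro ⟨⟨j, hj, hpj⟩, hpg⟩
      obtain ⟨s, hs, hms⟩ := minW_of_mem board st fm p j hpj
      rcases Nat.lt_or_ge s (d + 1) with hlt | hge
      · exact Or.inl ⟨⟨s, by omega, hms.1⟩, hpg⟩
      · have hsd : s = d + 1 := by omega
        subst hsd
        obtain ⟨q, hq, hpq⟩ := minW_pred board st fm p d hms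
        have hqg : q ≠ gl := fun hc => hup d le_rfl (hc ▸ hq.1)
        exact Or.inr ⟨q, (hF q).mpr ⟨hq, hqg⟩, hpq⟩
  · intro p
    rw [(hmem p).2, hV p]
    simp only [List.not_mem_nil, false_or]
    constructor
    · rintro ⟨hnv, hs⟩
      have hpg := hsucc_ne p hs
      have hpr := hsucc_reach p hs
      obtain ⟨s, hs', hms⟩ := minW_of_mem board st fm p (d + 1) hpr
      have : ¬ s ≤ d := by
        intro hsd
        exact hnv ⟨⟨s, hsd, hms.1⟩, hpg⟩
      have hsd : s = d + 1 := by omega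
      subst hsd
      exact ⟨hms, hpg⟩
    · rintro ⟨hmp, hpg⟩
      obtain ⟨q, hq, hpq⟩ := minW_pred board st fm p d hmp
      have hqg : q ≠ gl := fun hc => hup d le_rfl (hc ▸ hq.1)
      refine ⟨?_, ⟨q, (hF q).mpr ⟨hq, hqg⟩, hpq⟩⟩
      rintro ⟨⟨j, hj, hpj⟩, -⟩
      exact hmp.2 j (by omega) hpj

lemma bfsL_reaches (board : List String) (st gl : (Int × Int)) (fm : Nat) (hst : Vd board st)
    (m : Nat) (hm : minW board st fm gl m) :
    ∀ (f : Nat) (d : Nat) (F : List (Int × Int)) (V : PySem.Set (Int × Int)),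
      (∀ p, p ∈ F ↔ minW board st fm p d ∧ p ≠ gl) →
      (∀ p, p ∈ V ↔ (∃ j ≤ d, p ∈ reachL board st fm j) ∧ p ≠ gl) →
      d < m → sTot board ≤ f + d →
      bfsL board gl fm f F V (d : Int) = (m : Int) := by
  intro f
  induction f with
  | zero =>
    intro d F V _ _ hdm hfuel
    have := minW_bound board st fm hst gl m hm
    omega
  | succ f ih =>
    intro d F V hF hV hdm hfuel
    have hup : ∀ j ≤ d, gl ∉ reachL board st fm j := by
      intro j hj
      exact hm.2 j (by omega)
    obtain ⟨q, hq⟩ := minW_level_exists board st fm m gl hm d (by omega)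
    have hqg : q ≠ gl := fun hc => hup d le_rfl (hc ▸ hq.1)
    have hqF : q ∈ F := (hF q).mpr ⟨hq, hqg⟩
    cases hFc : F with
    | nil => rw [hFc] at hqF; exact absurd hqF (by simp)
    | cons y ys =>
      rw [hFc] at hF hqF
      show (match levelL board gl fm (y :: ys) V [] with
        | .inl _ => (d : Int) + 1
        | .inr (V', nxt) => bfsL board gl fm f nxt V' ((d : Int) + 1)) = (m : Int)
      cases he : levelL board gl fm (y :: ys) V [] with
      | inl u =>
        have hhit := (levelL_inl_iff board gl fm (y :: ys) V []).mp (by rw [he])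
        have hgl1 : gl ∈ reachL board st fm (d + 1) :=
          (frontier_goal_iff board st gl fm d (y :: ys) hF hup).mp hhit
        have hmd : m = d + 1 := by
          rcases Nat.lt_or_ge (d + 1) m with hlt | hge
          · exact absurd hgl1 (hm.2 (d + 1) hlt)
          · omega
        rw [hmd]
        push_cast
        ring
      | inr w =>
        obtain ⟨V', nxt⟩ := w
        obtain ⟨hV', hnxt, hup1⟩ := step_inv board st gl fm d (y :: ys) V V' nxt hF hV hup he
        have hdm1 : d + 1 < m := by
          rcases Nat.lt_or_ge (d + 1) m with hlt | hge
          · exact hlt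
          · exfalso
            have hmd : m = d + 1 := by omega
            exact hup1 (d + 1) le_rfl (hmd ▸ hm.1)
        have := ih (d + 1) nxt V' hnxt hV' hdm1 (by omega)
        rw [show ((d : Int) + 1) = ((d + 1 : Nat) : Int) by push_cast; ring]
        exact this

lemma bfsL_unreach (board : List String) (st gl : (Int × Int)) (fm : Nat) (hst : Vd board st)
    (hun : ∀ k, gl ∉ reachL board st fm k) :
    ∀ (f : Nat) (d : Nat) (F : List (Int × Int)) (V : PySem.Set (Int × Int)),
      (∀ p, p ∈ F ↔ minW board st fm p d ∧ p ≠ gl) →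
      (∀ p, p ∈ V ↔ (∃ j ≤ d, p ∈ reachL board st fm j) ∧ p ≠ gl) →
      sTot board ≤ f + d →
      bfsL board gl fm f F V (d : Int) = -1 := by
  intro f
  induction f with
  | zero =>
    intro d F V hF _ hfuel
    cases hFc : F with
    | nil => exact bfsL_nil board gl fm 0 V (d : Int)
    | cons y ys =>
      exfalso
      have hy : minW board st fm y d ∧ y ≠ gl := (hF y).mp (by rw [hFc]; simp)
      have := minW_bound board st fm hst y d hy.1
      omega
  | succ f ih =>
    intro d F V hF hV hfuel
    have hup : ∀ j ≤ d, gl ∉ reachL board st fm j := fun j _ => hun j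
    cases hFc : F with
    | nil => exact bfsL_nil board gl fm (f + 1) V (d : Int)
    | cons y ys =>
      rw [hFc] at hF
      show (match levelL board gl fm (y :: ys) V [] with
        | .inl _ => (d : Int) + 1
        | .inr (V', nxt) => bfsL board gl fm f nxt V' ((d : Int) + 1)) = -1
      cases he : levelL board gl fm (y :: ys) V [] with
      | inl u =>
        exfalso
        have hhit := (levelL_inl_iff board gl fm (y :: ys) V []).mp (by rw [he])
        exact hun (d + 1) ((frontier_goal_iff board st gl fm d (y :: ys) hF hup).mp hhit)
      | inr w =>
        obtain ⟨V', nxt⟩ := w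
        obtain ⟨hV', hnxt, -⟩ := step_inv board st gl fm d (y :: ys) V V' nxt hF hV hup he
        have := ih (d + 1) nxt V' hnxt hV' (by omega)
        rw [show ((d : Int) + 1) = ((d + 1 : Nat) : Int) by push_cast; ring]
        exact this

-- ----- locating R and G: A's scan = last elements of B's comprehensions -----

def rowOcc (i : Int) (l : List (Int × Char)) (c : Char) : List (Int × Int) :=
  l.filterMap (fun q => if q.2 = c then some (i, q.1) else none)

def gridOcc (grid : List (List Char)) (c : Char) : List (Int × Int) :=
  (PySem.List.enumerate grid).flatMap (fun p => rowOcc p.1 (PySem.List.enumerate p.2) c)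

lemma or_getLast_cons (x : (Int × Int)) (l : List (Int × Int)) (y : Option (Int × Int)) :
    Option.or (x :: l).getLast? y = Option.or l.getLast? (some x) := by
  cases l with
  | nil => rfl
  | cons a l =>
    rw [List.getLast?_cons_cons]
    obtain ⟨z, hz⟩ := Option.isSome_iff_exists.mp
      (by simp [List.getLast?_isSome] : (a :: l).getLast?.isSome)
    rw [hz]; rfl

lemma scanA_inner (i : Int) :
    ∀ (l : List (Int × Char)) (acc : Option (Int × Int) × Option (Int × Int)),
      l.foldl (fun acc2 q =>
        if q.2 = 'R' then (some (i, q.1), acc2.2)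
        else if q.2 = 'G' then (acc2.1, some (i, q.1))
        else acc2) acc =
      (Option.or (rowOcc i l 'R').getLast? acc.1,
       Option.or (rowOcc i l 'G').getLast? acc.2) := by
  intro l
  induction l with
  | nil => intro acc; simp [rowOcc]
  | cons q l ih =>
    intro acc
    rw [List.foldl_cons, ih]
    by_cases h1 : q.2 = 'R'
    · have h2 : ¬ q.2 = 'G' := by rw [h1]; decide
      simp only [rowOcc, List.filterMap_cons, h1, if_pos]
      rw [← rowOcc, ← rowOcc, or_getLast_cons]
      simp
    · by_cases h2 : q.2 = 'G'
      · simp only [rowOcc, List.filterMap_cons, h2, if_pos]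
        rw [← rowOcc, ← rowOcc, or_getLast_cons]
        simp
      · simp only [rowOcc, List.filterMap_cons]
        rw [← rowOcc, ← rowOcc]
        simp [h1, h2]

lemma scanA_outer :
    ∀ (L : List (Int × List Char)) (acc : Option (Int × Int) × Option (Int × Int)),
      L.foldl (fun acc p =>
        (PySem.List.enumerate p.2).foldl (fun acc2 q =>
          if q.2 = 'R' then (some (p.1, q.1), acc2.2)
          else if q.2 = 'G' then (acc2.1, some (p.1, q.1))
          else acc2) acc) acc =
      (Option.or (L.flatMap (fun p => rowOcc p.1 (PySem.List.enumerate p.2) 'R')).getLast? acc.1,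
       Option.or (L.flatMap (fun p => rowOcc p.1 (PySem.List.enumerate p.2) 'G')).getLast? acc.2) := by
  intro L
  induction L with
  | nil => intro acc; simp
  | cons p L ih =>
    intro acc
    rw [List.foldl_cons, scanA_inner, ih, List.flatMap_cons, List.flatMap_cons,
      List.getLast?_append, List.getLast?_append, Option.or_assoc, Option.or_assoc]

lemma scanA_eq (grid : List (List Char)) :
    scanA grid = ((gridOcc grid 'R').getLast?, (gridOcc grid 'G').getLast?) := by
  rw [scanA, scanA_outer]
  simp [gridOcc]

lemma enumerate_map {α β : Type} (f : α → β) (l : List α) :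
    ∀ (s : Int), PySem.List.enumerate (l.map f) s =
      (PySem.List.enumerate l s).map (fun p => (p.1, f p.2)) := by
  induction l with
  | nil => intro s; simp [PySem.List.enumerate_nil]
  | cons x xs ih => intro s; simp [PySem.List.enumerate_cons, ih]

lemma occB_eq_gridOcc (board : List String) (c : Char) :
    occB board c = gridOcc (bmap board) c := by
  rw [occB, gridOcc, bmap, enumerate_map, List.flatMap_map]
  rfl

def charAt (board : List String) (p : (Int × Int)) : Char :=
  (board.getD p.1.toNat "").toList.getD p.2.toNat ' '

lemma mem_occB (board : List String) (c : Char) (p : (Int × Int)) :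
    p ∈ occB board c → Vd board p ∧ charAt board p = c := by
  intro h
  rw [occB] at h
  obtain ⟨a, ha, hin⟩ := List.mem_flatMap.mp h
  obtain ⟨k, hk, rfl⟩ := (PySem.List.mem_enumerate_iff board 0 a).mp ha
  obtain ⟨q, hq, hqe⟩ := List.mem_filterMap.mp hin
  obtain ⟨j, hj, rfl⟩ := (PySem.List.mem_enumerate_iff _ 0 q).mp hq
  have hj' : j < board[k].toList.length := hj
  by_cases hc : (((0 : Int) + (j : Int), board[k].toList[j]).2 = c)
  · rw [if_pos hc] at hqe
    obtain rfl := Option.some_inj.mp hqe |>.symm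
    have hVd : Vd board (((0:Int) + (k:Int), (0:Int) + (j:Int)) : (Int × Int)) := by
      refine ⟨by omega, by push_cast; omega, by omega, ?_⟩
      have hb : ((0:Int) + (k:Int)).toNat = k := by omega
      rw [hb]
      have : board.getD k "" = board[k] := List.getD_eq_getElem board "" hk
      rw [this]
      show ((0:Int) + (j:Int)) < ((board[k].toList.length : Nat) : Int)
      omega
    refine ⟨hVd, ?_⟩
    rw [charAt]
    have hb : ((0:Int) + (k:Int)).toNat = k := by omega
    have hb2 : ((0:Int) + (j:Int)).toNat = j := by omega
    simp only [hb, hb2]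
    rw [List.getD_eq_getElem board "" hk] at *
    rw [List.getD_eq_getElem _ ' ' hj]
    exact hc
  · rw [if_neg hc] at hqe
    exact absurd hqe (by simp)

lemma occB_ne_nil (board : List String) (c : Char)
    (h : ∃ r ∈ board, c ∈ r.toList) : occB board c ≠ [] := by
  obtain ⟨r, hr, hc⟩ := h
  obtain ⟨k, hk, rfl⟩ := List.mem_iff_getElem.mp hr
  obtain ⟨j, hj, hje⟩ := List.mem_iff_getElem.mp hc
  apply List.ne_nil_of_mem (a := (((0:Int) + (k:Int), (0:Int) + (j:Int)) : (Int × Int)))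
  rw [occB]
  apply List.mem_flatMap.mpr
  refine ⟨((0:Int) + (k:Int), board[k]), (PySem.List.mem_enumerate_iff board 0 _).mpr ⟨k, hk, rfl⟩, ?_⟩
  apply List.mem_filterMap.mpr
  refine ⟨((0:Int) + (j:Int), board[k].toList[j]), (PySem.List.mem_enumerate_iff _ 0 _).mpr ⟨j, hj, rfl⟩, ?_⟩
  rw [if_pos hje]

lemma sum_bmap (board : List String) :
    ((bmap board).map List.length).sum = (board.map (fun r => r.toList.length)).sum := by
  rw [bmap, List.map_map]
  rfl

-- ----- assembly -----

lemma solution_spec_aux (board : List String)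
    (hpre : (∃ r ∈ board, 'R' ∈ r.toList) ∧ (∃ r ∈ board, 'G' ∈ r.toList)) :
    solution board = solution_alt board := by
  have hrs := occB_ne_nil board 'R' hpre.1
  have hgs := occB_ne_nil board 'G' hpre.2
  obtain ⟨st, hst⟩ := Option.isSome_iff_exists.mp (List.getLast?_isSome.mpr hrs)
  obtain ⟨gl, hgl⟩ := Option.isSome_iff_exists.mp (List.getLast?_isSome.mpr hgs)
  have hstm := mem_occB board 'R' st (List.mem_of_getLast? hst)
  have hglm := mem_occB board 'G' gl (List.mem_of_getLast? hgl)
  have hne : st ≠ gl := by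
    intro he
    rw [he, hglm.2] at hstm
    exact absurd hstm.2 (by decide)
  show (match scanA (bmap board) with
    | (some st, some gl) =>
        bfsA (bmap board) gl ((bmap board).length + ((bmap board).map List.length).sum + 2)
          (((bmap board).map List.length).sum + 2) [(st, 0)] (PySem.Set.ofList [st])
    | _ => -1) = _
  rw [scanA_eq, ← occB_eq_gridOcc, ← occB_eq_gridOcc, hst, hgl]
  show _ = (match PySem.List.pyGet? (occB board 'R') (-1) with
    | none => -1
    | some st =>
      match PySem.List.pyGet? (occB board 'G') (-1) with
      | none => -1
      | some gl =>
          loopB board gl (board.length + (board.map (fun r : String => r.toList.length)).sum + 2)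
            ((board.map (fun r : String => r.toList.length)).sum) 1 (PySem.Set.ofList [st]))
  rw [PySem.List.pyGet?_neg_one, PySem.List.pyGet?_neg_one, hst, hgl]
  show bfsA (bmap board) gl _ _ [(st, 0)] (PySem.Set.ofList [st]) =
    loopB board gl _ _ 1 (PySem.Set.ofList [st])
  have hofl : PySem.Set.ofList [st] = [st] := rfl
  rw [sum_bmap, bmap_length, hofl]
  -- A's deque BFS = the level-synchronous form
  have hmain := main_corr board gl
    (board.length + (board.map (fun r : String => r.toList.length)).sum + 2) hglm.1
    ((board.map (fun r : String => r.toList.length)).sum + 2)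
    ((board.map (fun r : String => r.toList.length)).sum + 2)
    [st] [st] 0
    (by simpa using fun h => hne h.symm)
    (by simp)
    (by intro p hp; rw [List.mem_singleton.mp hp]; exact hstm.1)
    (by intro p hp; rw [List.mem_singleton.mp hp]; exact hstm.1)
    (by have : sTot board = (board.map (fun r : String => r.toList.length)).sum := rfl; omega)
    (by have : sTot board = (board.map (fun r : String => r.toList.length)).sum := rfl; omega)
  have hA : bfsA (bmap board) gl (board.length + (board.map (fun r : String => r.toList.length)).sum + 2)
      ((board.map (fun r : String => r.toList.length)).sum + 2) [(st, 0)] [st] =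
      bfsL board gl (board.length + (board.map (fun r : String => r.toList.length)).sum + 2)
        ((board.map (fun r : String => r.toList.length)).sum + 2) [st] [st] 0 := by
    simpa using hmain
  rw [hA]
  -- both sides against the slide-walk spec
  set fmv := board.length + (board.map (fun r : String => r.toList.length)).sum + 2 with hfmv
  have hsum : sTot board = (board.map (fun r : String => r.toList.length)).sum := rfl
  have hF0 : ∀ p, p ∈ ([st] : List (Int × Int)) ↔ minW board st fmv p 0 ∧ p ≠ gl := by
    intro p
    constructor
    · intro hp
      rw [List.mem_singleton.mp hp]
      exact ⟨⟨by simp [reachL], fun j hj => by omega⟩, hne⟩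
    · rintro ⟨⟨hp, -⟩, -⟩
      rw [show reachL board st fmv 0 = [st] from rfl] at hp
      exact hp
  have hV0 : ∀ p, p ∈ ([st] : List (Int × Int)) ↔
      (∃ j ≤ 0, p ∈ reachL board st fmv j) ∧ p ≠ gl := by
    intro p
    constructor
    · intro hp
      rw [List.mem_singleton.mp hp]
      exact ⟨⟨0, le_rfl, by simp [reachL]⟩, hne⟩
    · rintro ⟨⟨j, hj, hp⟩, -⟩
      interval_cases j
      rw [show reachL board st fmv 0 = [st] from rfl] at hp
      exact hp
  have hmem0 : ∀ p, p ∈ ([st] : List (Int × Int)) ↔ p ∈ reachL board st fmv 0 := by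
    intro p
    rw [show reachL board st fmv 0 = [st] from rfl]
  by_cases hre : ∃ k, gl ∈ reachL board st fmv k
  · obtain ⟨k0, hk0⟩ := hre
    obtain ⟨m, -, hm⟩ := minW_of_mem board st fmv gl k0 hk0
    have hm0 : 0 < m := by
      rcases Nat.eq_zero_or_pos m with h0 | h0
      · exfalso
        have := hm.1
        rw [h0, show reachL board st fmv 0 = [st] from rfl] at this
        exact hne (List.mem_singleton.mp this).symm
      · exact h0
    have hmb := minW_bound board st fmv hstm.1 gl m hm
    have hAv := bfsL_reaches board st gl fmv hstm.1 m hm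
      ((board.map (fun r : String => r.toList.length)).sum + 2) 0 [st] [st]
      hF0 hV0 hm0 (by omega)
    have hBv := loopB_reaches board st gl fmv m hm
      ((board.map (fun r : String => r.toList.length)).sum) 0 [st]
      (fun p => hmem0 p) hm0 (by omega)
    rw [show ((0 : Nat) : Int) = (0 : Int) from rfl] at hAv
    rw [show ((0 : Nat) : Int) + 1 = (1 : Int) by ring] at hBv
    rw [hAv, hBv]
  · rw [not_exists] at hre
    have hAv := bfsL_unreach board st gl fmv hstm.1 hre
      ((board.map (fun r : String => r.toList.length)).sum + 2) 0 [st] [st]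
      hF0 hV0 (by omega)
    have hBv := loopB_unreach board st gl fmv hre
      ((board.map (fun r : String => r.toList.length)).sum) 1 0 [st]
      (fun p => hmem0 p)
    rw [show ((0 : Nat) : Int) = (0 : Int) from rfl] at hAv
    rw [hAv, hBv]

-- ===== VERDICT (by name: the statement is the Claim_ definition above) =====
theorem solution_spec : Claim_equal_solution := by
  intro board _ hpre
  exact solution_spec_aux board hpre
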